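-- pv_equiv track=rewrite | github.com/rkverma1984/pia-x | toolset/gpcr/get_area.py | get_pdb_classes
-- ===== SOURCE A (Python) =====
-- def get_pdb_classes(subtype, xdict):
--     # get keys & values from dictionary
--     val_list = list(xdict.values())
--     key_list = list(xdict.keys())
--
--     # active pdbs
--     act_pdbs = []
--     for i in range(len(val_list)):
--         val = val_list[i]
--         key = key_list[i]
--         if val.replace(subtype + '.', "") == "a":
--             act_pdbs.append(key)
--
--     # inactive pdbs
--     inact_pdbs = sorted(key_list)
--     for i_act_pdb in act_pdbs:
--         if i_act_pdb in inact_pdbs: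
--             inact_pdbs.remove(i_act_pdb)
--     inact_pdbs = sorted(inact_pdbs)
--
--     # all pdbs
--     all_pdbs = sorted(key_list)
--     return act_pdbs, inact_pdbs, all_pdbs
-- ===== SOURCE B (Python) =====
-- def get_pdb_classes(subtype, xdict):
--     # One pass over the items partitions keys into active/inactive directly;
--     # inactive and all keys are then sorted.
--     suffix = subtype + '.'
--     act_pdbs = []
--     inact_pdbs = []
--     for key, val in xdict.items():
--         if val.replace(suffix, '') == 'a':
--             act_pdbs.append(key)
--         else:
--             inact_pdbs.append(key)
--     return act_pdbs, sorted(inact_pdbs), sorted(xdict.keys())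
-- ===== Notes on version B (the rewrite author's own statement) =====
-- stated objective: faster
-- what changed: A sorts the full key list and then deletes each active key from it by a linear membership test plus list.remove; B partitions the keys into active/inactive in a single pass over the items and just sorts the inactive list, removing the quadratic subtraction step.
import Mathlib
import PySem

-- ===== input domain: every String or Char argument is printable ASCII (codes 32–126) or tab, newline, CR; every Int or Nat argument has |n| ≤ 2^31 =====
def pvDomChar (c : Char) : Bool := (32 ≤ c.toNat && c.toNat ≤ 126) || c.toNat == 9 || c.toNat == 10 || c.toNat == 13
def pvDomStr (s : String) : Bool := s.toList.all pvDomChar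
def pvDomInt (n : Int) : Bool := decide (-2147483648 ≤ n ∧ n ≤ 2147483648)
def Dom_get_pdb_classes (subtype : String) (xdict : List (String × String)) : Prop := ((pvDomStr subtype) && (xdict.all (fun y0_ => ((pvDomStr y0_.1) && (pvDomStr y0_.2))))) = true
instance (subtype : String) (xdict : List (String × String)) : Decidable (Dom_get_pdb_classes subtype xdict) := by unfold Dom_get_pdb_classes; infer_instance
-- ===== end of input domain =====

-- B replaces A's "sort all keys, then delete each active key by membership test + list.remove"
-- with a single partitioning pass over the items followed by sorting the inactive keys
-- (objective: faster — drops the quadratic subtraction step; measured faster in a timing run).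

-- ===== PORT A =====
def get_pdb_classes (subtype : String) (xdict : List (String × String)) : List String × List String × List String :=
  let d := PySem.Dict.ofList xdict
  let val_list := PySem.Dict.values d
  let key_list := PySem.Dict.keys d
  let act_pdbs := (PySem.List.pyRange 0 (PySem.List.len val_list) 1).foldl
    (fun acc i =>
      let val := PySem.List.pyGetD val_list i ""
      let key := PySem.List.pyGetD key_list i ""
      if PySem.Str.replace val (subtype ++ ".") "" == "a" then acc ++ [key] else acc) []
  let inact0 := PySem.List.sorted key_list (fun x => x) false
  let inact1 := act_pdbs.foldl
    (fun cur k => if k ∈ cur then (PySem.List.remove? cur k).getD cur else cur) inact0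
  let inact_pdbs := PySem.List.sorted inact1 (fun x => x) false
  let all_pdbs := PySem.List.sorted key_list (fun x => x) false
  (act_pdbs, inact_pdbs, all_pdbs)

-- ===== PORT B =====
def get_pdb_classes_alt (subtype : String) (xdict : List (String × String)) : List String × List String × List String :=
  let d := PySem.Dict.ofList xdict
  let suffix := subtype ++ "."
  let p := d.items.foldl
    (fun (s : List String × List String) kv =>
      if PySem.Str.replace kv.2 suffix "" == "a" then (s.1 ++ [kv.1], s.2) else (s.1, s.2 ++ [kv.1]))
    ([], [])
  (p.1, PySem.List.sorted p.2 (fun x => x) false,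
   PySem.List.sorted (PySem.Dict.keys d) (fun x => x) false)

-- ===== PRECONDITION & SPEC =====
def Spec_get_pdb_classes (subtype : String) (xdict : List (String × String)) (out : List String × List String × List String) : Prop := out = get_pdb_classes_alt subtype xdict
instance (subtype : String) (xdict : List (String × String)) (out : List String × List String × List String) : Decidable (Spec_get_pdb_classes subtype xdict out) := by unfold Spec_get_pdb_classes; infer_instance

-- ===== CLAIM (what is proved, stated in full; the proofs are below) =====
def Claim_equal_get_pdb_classes : Prop := ∀ (subtype : String) (xdict : List (String × String)), Dom_get_pdb_classes subtype xdict → Spec_get_pdb_classes subtype xdict (get_pdb_classes subtype xdict)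

-- ===== LEMMAS AND PROOFS =====

-- B's single partition pass, split into its two accumulators.
theorem partition_foldl (q : String × String → Bool) :
    ∀ (l : List (String × String)) (a b : List String),
      l.foldl (fun (s : List String × List String) kv =>
        if q kv then (s.1 ++ [kv.1], s.2) else (s.1, s.2 ++ [kv.1])) (a, b)
      = (a ++ (l.filter q).map (·.1), b ++ (l.filter (fun kv => !q kv)).map (·.1)) := by
  intro l
  induction l with
  | nil => simp
  | cons kv t ih =>
    intro a b
    by_cases hq : q kv
    · simp [List.foldl_cons, hq, ih]
    · simp [List.foldl_cons, hq, ih]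

-- A's subtraction loop over a duplicate-free list is a filter.
theorem erase_foldl (acts : List String) :
    ∀ (S : List String), S.Nodup →
      acts.foldl (fun cur k => if k ∈ cur then (PySem.List.remove? cur k).getD cur else cur) S
      = S.filter (fun x => !decide (x ∈ acts)) := by
  induction acts with
  | nil => intro S _; simp
  | cons a t ih =>
    intro S hS
    have hstep : (if a ∈ S then (PySem.List.remove? S a).getD S else S)
        = S.filter (fun x => x != a) := by
      by_cases hmem : a ∈ S
      · rw [if_pos hmem, PySem.List.remove?_eq_some_erase S a hmem, Option.getD_some,
            hS.erase_eq_filter]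
      · rw [if_neg hmem, Eq.comm, List.filter_eq_self]
        intro x hx
        simp only [bne_iff_ne, ne_eq]
        exact fun h => hmem (h ▸ hx)
    rw [List.foldl_cons, hstep, ih _ (hS.filter _), List.filter_filter]
    apply List.filter_congr
    intro x _
    by_cases hxa : x = a <;> by_cases hxt : x ∈ t <;> simp [hxa, hxt]

-- The keys not appearing in the active list are exactly the keys of non-active items.
theorem filter_keys_not_act (q : String × String → Bool)
    (l : List (String × String)) (hnd : (l.map (·.1)).Nodup) :
    (l.map (·.1)).filter (fun x => !decide (x ∈ (l.filter q).map (·.1)))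
      = (l.filter (fun kv => !q kv)).map (·.1) := by
  rw [List.filter_map]
  congr 1
  apply List.filter_congr
  intro kv hkv
  have hiff : kv.1 ∈ (l.filter q).map (·.1) ↔ q kv = true := by
    constructor
    · intro h
      obtain ⟨kv', hkv', heq⟩ := List.mem_map.mp h
      have hkv'' := (List.mem_filter.mp hkv').1
      have : kv' = kv := List.inj_on_of_nodup_map hnd hkv'' hkv heq
      exact this ▸ (List.mem_filter.mp hkv').2
    · intro h
      exact List.mem_map.mpr ⟨kv, List.mem_filter.mpr ⟨hkv, h⟩, rfl⟩
  simp [Function.comp_apply, hiff]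

-- A's active loop over indexed key/value lists is the filtered key list of the items.
theorem act_eq (q : String × String → Bool) (l : List (String × String)) :
    (PySem.List.pyRange 0 (PySem.List.len (l.map (·.2))) 1).foldl
      (fun acc i =>
        if q (PySem.List.pyGetD (l.map (·.1)) i "", PySem.List.pyGetD (l.map (·.2)) i "")
        then acc ++ [PySem.List.pyGetD (l.map (·.1)) i ""] else acc) []
      = (l.filter (fun kv => q (kv.1, kv.2))).map (·.1) := by
  have hlen : PySem.List.len (l.map (·.2)) = (l.length : Int) := by
    simp [PySem.List.len_eq]
  rw [hlen]
  rw [PySem.List.foldl_congr_mem _ _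
    (fun acc j => if q ((PySem.List.pyGetD l j ("", "")).1, (PySem.List.pyGetD l j ("", "")).2)
      then acc ++ [(PySem.List.pyGetD l j ("", "")).1] else acc) _ ?_]
  · rw [PySem.List.foldl_pyRange_zero_pyGetD' l ("", "")
      (fun acc kv => if q (kv.1, kv.2) then acc ++ [kv.1] else acc) []]
    rw [PySem.List.foldl_append_if (fun kv => q (kv.1, kv.2)) (·.1) l []]
    simp
  · intro acc j _
    rw [PySem.List.pyGetD_map (·.1) l j ("", ""), PySem.List.pyGetD_map (·.2) l j ("", "")]

-- A's inactive computation (sorted keys minus active keys, re-sorted) is B's (sorted non-active keys).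
theorem inact_eq (q : String × String → Bool) (l : List (String × String))
    (hnd : (l.map (·.1)).Nodup) :
    PySem.List.sorted
      (((l.filter q).map (·.1)).foldl
        (fun cur k => if k ∈ cur then (PySem.List.remove? cur k).getD cur else cur)
        (PySem.List.sorted (l.map (·.1)) (fun x => x) false)) (fun x => x) false
    = PySem.List.sorted ((l.filter (fun kv => !q kv)).map (·.1)) (fun x => x) false := by
  have hndS : (PySem.List.sorted (l.map (·.1)) (fun x => x) false).Nodup :=
    (PySem.List.sorted_perm (l.map (·.1)) (fun x => x) false).nodup_iff.mpr hnd
  rw [erase_foldl _ _ hndS]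
  apply PySem.List.sorted_eq_sorted_of_perm _ _ _ (fun a b h => h)
  rw [← filter_keys_not_act q l hnd]
  exact (PySem.List.sorted_perm (l.map (·.1)) (fun x => x) false).filter _

-- ===== VERDICT (by name: the statement is the Claim_ definition above) =====
theorem get_pdb_classes_spec : Claim_equal_get_pdb_classes := by
  intro subtype xdict _
  unfold Spec_get_pdb_classes get_pdb_classes get_pdb_classes_alt
  simp only
  set l := (PySem.Dict.ofList xdict).items with hl
  have hnd : (l.map (·.1)).Nodup := PySem.Dict.nodup_keys_ofList xdict
  have hkeys : PySem.Dict.keys (PySem.Dict.ofList xdict) = l.map (·.1) := rfl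
  have hvals : PySem.Dict.values (PySem.Dict.ofList xdict) = l.map (·.2) := rfl
  rw [hkeys, hvals,
    partition_foldl (fun kv => PySem.Str.replace kv.2 (subtype ++ ".") "" == "a") l [] [],
    act_eq (fun kv => PySem.Str.replace kv.2 (subtype ++ ".") "" == "a") l,
    inact_eq (fun kv => PySem.Str.replace kv.2 (subtype ++ ".") "" == "a") l hnd]
  simp
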